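-- pv_equiv track=rewrite | github.com/damuma/zendesk-cluster | jira_matcher.py | _cluster_email_sources
-- ===== SOURCE A (Python) =====
-- def _cluster_email_sources(
--     cluster: dict, tickets_by_id: dict[int, dict]
-- ) -> dict[str, list[int]]:
--     """Map each cluster-associated email to the list of zendesk_ids that
--     contributed it. Used to preserve trazabilidad in email_match."""
--     out: dict[str, list[int]] = {}
--     for tid in cluster.get("ticket_ids") or []:
--         t = tickets_by_id.get(tid) or {}
--         for e in t.get("emails_asociados") or []:
--             if not e:
--                 continue
--             key = e.lower()
--             if key not in out:
--                 out[key] = []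
--             if tid not in out[key]:
--                 out[key].append(tid)
--     return out
-- ===== SOURCE B (Python) =====
-- def _cluster_email_sources(
--     cluster: dict, tickets_by_id: dict[int, dict]
-- ) -> dict[str, list[int]]:
--     """Flatten-then-group: materialize the flat stream of (lowercased email,
--     tid) pairs, then compute the answer positionally from that stream —
--     keys in first-occurrence order, each key's tids by filtering the stream."""
--     pairs = [
--         (e.lower(), tid)
--         for tid in cluster.get("ticket_ids") or []
--         for e in (tickets_by_id.get(tid) or {}).get("emails_asociados") or []
--         if e
--     ]
--     keys = list(dict.fromkeys(k for k, _ in pairs))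
--     return {k: list(dict.fromkeys(t for k2, t in pairs if k2 == k)) for k in keys}
-- ===== Notes on version B (the rewrite author's own statement) =====
-- stated objective: alternative
-- what changed: A builds the result in one stateful scan over tickets, mutating a dict with inline membership checks; B has no running dict at all: it flattens the input to a stream of (lowercased email, tid) pairs, takes the deduped key stream for the key order, and computes each key's list by filtering the pair stream and deduping, so the result is a pure group-by over a materialized pair list.
import Mathlib
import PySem

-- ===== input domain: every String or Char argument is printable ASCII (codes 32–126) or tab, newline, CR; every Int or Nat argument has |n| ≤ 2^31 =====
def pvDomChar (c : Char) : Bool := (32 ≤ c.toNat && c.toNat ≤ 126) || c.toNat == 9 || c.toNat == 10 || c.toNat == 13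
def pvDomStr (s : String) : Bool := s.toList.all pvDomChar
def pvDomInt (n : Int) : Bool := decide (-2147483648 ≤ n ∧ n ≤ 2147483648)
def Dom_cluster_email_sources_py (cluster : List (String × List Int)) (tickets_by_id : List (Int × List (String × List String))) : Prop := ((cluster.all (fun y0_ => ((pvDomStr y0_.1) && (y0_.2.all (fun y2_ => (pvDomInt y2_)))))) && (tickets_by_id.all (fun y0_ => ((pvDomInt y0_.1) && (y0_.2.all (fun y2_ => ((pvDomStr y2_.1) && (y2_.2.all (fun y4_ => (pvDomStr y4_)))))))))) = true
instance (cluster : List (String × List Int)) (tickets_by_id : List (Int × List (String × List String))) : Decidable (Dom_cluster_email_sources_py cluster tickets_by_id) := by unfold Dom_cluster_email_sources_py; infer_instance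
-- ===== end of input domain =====

-- B replaces A's stateful dict-building scan by a pure group-by over a flattened (email, tid) pair stream (alternative decomposition, same cost).

-- ===== PORT A =====
-- Loop body of A's inner 'for e in …' loop (a helper; Python dicts are PySem.Dict)
def pvAStep (tid : Int) (out : PySem.Dict String (List Int)) (e : String) : PySem.Dict String (List Int) :=
  if e = "" then out
  else
    let key := PySem.Str.lower e
    let out := if out.contains key then out else out.insert key []
    if tid ∈ out.getD key [] then out
    else out.insert key (out.getD key [] ++ [tid])

def cluster_email_sources_py (cluster : List (String × List Int)) (tickets_by_id : List (Int × List (String × List String))) : List (String × List Int) :=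
  ((((PySem.Dict.mk cluster).get? "ticket_ids").getD []).foldl
    (fun out tid =>
      let t := ((PySem.Dict.mk tickets_by_id).get? tid).getD []
      ((((PySem.Dict.mk t).get? "emails_asociados").getD []).foldl (pvAStep tid) out))
    PySem.Dict.empty).items

-- ===== PORT B =====
-- the pair comprehension: [(e.lower(), tid) for tid in … for e in … if e]
def pvBPairs (cluster : List (String × List Int)) (tickets_by_id : List (Int × List (String × List String))) : List (String × Int) :=
  (((PySem.Dict.mk cluster).get? "ticket_ids").getD []).flatMap
    (fun tid =>
      ((((PySem.Dict.mk (((PySem.Dict.mk tickets_by_id).get? tid).getD [])).get? "emails_asociados").getD []).filterMap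
        (fun e => if e = "" then none else some (PySem.Str.lower e, tid))))

def cluster_email_sources_py_alt (cluster : List (String × List Int)) (tickets_by_id : List (Int × List (String × List String))) : List (String × List Int) :=
  let pairs := pvBPairs cluster tickets_by_id
  -- keys = list(dict.fromkeys(k for k, _ in pairs))
  let keys := PySem.List.dedup (pairs.map Prod.fst)
  -- {k: list(dict.fromkeys(t for k2, t in pairs if k2 == k)) for k in keys}
  keys.map (fun k => (k, PySem.List.dedup ((pairs.filter (fun p => p.1 == k)).map Prod.snd)))

-- ===== PRECONDITION & SPEC =====
def Spec_cluster_email_sources_py (cluster : List (String × List Int)) (tickets_by_id : List (Int × List (String × List String))) (out : List (String × List Int)) : Prop := out = cluster_email_sources_py_alt cluster tickets_by_id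
instance (cluster : List (String × List Int)) (tickets_by_id : List (Int × List (String × List String))) (out : List (String × List Int)) : Decidable (Spec_cluster_email_sources_py cluster tickets_by_id out) := by unfold Spec_cluster_email_sources_py; infer_instance

-- ===== CLAIM (what is proved, stated in full; the proofs are below) =====
def Claim_equal_cluster_email_sources_py : Prop := ∀ (cluster : List (String × List Int)) (tickets_by_id : List (Int × List (String × List String))), Dom_cluster_email_sources_py cluster tickets_by_id → Spec_cluster_email_sources_py cluster tickets_by_id (cluster_email_sources_py cluster tickets_by_id)

-- ===== LEMMAS AND PROOFS =====

-- A's loop body, expressed on one (key, tid) pair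
def pvStep (d : PySem.Dict String (List Int)) (p : String × Int) : PySem.Dict String (List Int) :=
  let d := if d.contains p.1 then d else d.insert p.1 []
  if p.2 ∈ d.getD p.1 [] then d
  else d.insert p.1 (d.getD p.1 [] ++ [p.2])

theorem pvAStep_eq (tid : Int) (d : PySem.Dict String (List Int)) (e : String) :
    pvAStep tid d e = if e = "" then d else pvStep d (PySem.Str.lower e, tid) := by
  unfold pvAStep pvStep; simp only []

-- the pure group-by over a pair stream (B's second phase)
def pvGroup (ps : List (String × Int)) : List (String × List Int) :=
  (PySem.List.dedup (ps.map Prod.fst)).map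
    (fun k => (k, PySem.List.dedup ((ps.filter (fun p => p.1 == k)).map Prod.snd)))

theorem pv_dedup_append {α : Type} [DecidableEq α] (xs : List α) (x : α) :
    PySem.List.dedup (xs ++ [x]) = if x ∈ xs then PySem.List.dedup xs else PySem.List.dedup xs ++ [x] := by
  simp only [PySem.List.dedup_eq_ofList, PySem.Set.ofList_append_singleton]
  by_cases h : x ∈ xs
  · rw [PySem.Set.add_of_mem ((PySem.Set.mem_ofList xs x).2 h)]; simp [h]
  · rw [PySem.Set.add_of_not_mem (fun hm => h ((PySem.Set.mem_ofList xs x).1 hm))]; simp [h]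

theorem pv_group_keys (ps : List (String × Int)) :
    (pvGroup ps).map Prod.fst = PySem.List.dedup (ps.map Prod.fst) := by
  simp [pvGroup, List.map_map, Function.comp_def]

theorem pv_filter_nil (ps : List (String × Int)) (k : String) (hk : k ∉ ps.map Prod.fst) :
    ps.filter (fun p => p.1 == k) = [] := by
  refine List.filter_eq_nil_iff.2 (fun q hq => ?_)
  simp only [beq_iff_eq]
  intro h
  exact hk (h ▸ List.mem_map_of_mem hq)

-- A's fold over the flattened pair stream produces exactly B's group-by
theorem pv_fold_items (ps : List (String × Int)) :
    (ps.foldl pvStep PySem.Dict.empty).items = pvGroup ps := by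
  induction ps using List.reverseRecOn with
  | nil => rfl
  | append_singleton ps p ih =>
    obtain ⟨k, t⟩ := p
    rw [List.foldl_append, List.foldl_cons, List.foldl_nil]
    set d := ps.foldl pvStep PySem.Dict.empty with hd
    have hK : d.keys = PySem.List.dedup (ps.map Prod.fst) := by
      rw [show d.keys = d.items.map Prod.fst from rfl, ih, pv_group_keys]
    have hnd : d.keys.Nodup := by rw [hK]; exact PySem.List.nodup_dedup _
    by_cases hk : k ∈ ps.map Prod.fst
    · -- existing key
      have hc : d.contains k = true := by
        rw [PySem.Dict.contains_eq_decide_mem_keys, hK]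
        simp [hk]
      set v := PySem.List.dedup ((ps.filter (fun p => p.1 == k)).map Prod.snd) with hv
      have hmem : (k, v) ∈ d.items := by
        rw [ih]
        exact List.mem_map.2 ⟨k, (PySem.List.mem_dedup _ _).2 hk, rfl⟩
      have hget : d.get? k = some v := PySem.Dict.get?_of_mem_items d hmem hnd
      have hgd : d.getD k [] = v := by rw [PySem.Dict.getD_eq_get?_getD, hget]; rfl
      unfold pvStep
      simp only [hc, ite_true, hgd]
      by_cases ht : t ∈ v
      · have htf : t ∈ (ps.filter (fun p => p.1 == k)).map Prod.snd := (PySem.List.mem_dedup _ _).1 ht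
        simp only [ht, ite_true, ih]
        unfold pvGroup
        rw [List.map_append, List.map_cons, List.map_nil, pv_dedup_append, if_pos hk]
        refine (List.map_congr_left (fun k' hk' => ?_)).symm
        by_cases hkk : k' = k
        · subst hkk
          rw [List.filter_append, show List.filter (fun p => p.1 == k') [(k', t)] = [(k', t)] from by simp,
            List.map_append, List.map_cons, List.map_nil, pv_dedup_append, if_pos htf]
        · simp [List.filter_append, Ne.symm hkk]
      · have htf : t ∉ (ps.filter (fun p => p.1 == k)).map Prod.snd :=
          fun h => ht ((PySem.List.mem_dedup _ _).2 h)
        simp only [ht, ite_false]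
        rw [PySem.Dict.items_insert_of_contains d _ hc, ih]
        unfold pvGroup
        rw [List.map_append, List.map_cons, List.map_nil, pv_dedup_append, if_pos hk, List.map_map]
        refine List.map_congr_left (fun k' hk' => ?_)
        by_cases hkk : k' = k
        · subst hkk
          rw [List.filter_append, show List.filter (fun p => p.1 == k') [(k', t)] = [(k', t)] from by simp,
            List.map_append, List.map_cons, List.map_nil, pv_dedup_append, if_neg htf]
          simpa using hv
        · simp [Function.comp, List.filter_append, Ne.symm hkk, hkk]
    · -- fresh key
      have hc : d.contains k = false := by
        rw [PySem.Dict.contains_eq_decide_mem_keys, hK]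
        simp only [decide_eq_false_iff_not, PySem.List.mem_dedup]
        exact hk
      unfold pvStep
      simp only [hc, Bool.false_eq_true, ite_false, PySem.Dict.getD_insert_self,
        List.not_mem_nil, List.nil_append, PySem.Dict.insert_insert_self]
      rw [PySem.Dict.items_insert_of_not_contains d _ hc, ih]
      unfold pvGroup
      rw [List.map_append, List.map_cons, List.map_nil, pv_dedup_append, if_neg hk, List.map_append]
      congr 1
      · refine List.map_congr_left (fun k' hk' => ?_)
        have hkk : k' ≠ k := fun h => hk (h ▸ (PySem.List.mem_dedup _ _).1 hk')
        simp [List.filter_append, Ne.symm hkk]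
      · simp only [List.map_cons, List.map_nil, List.filter_append]
        rw [pv_filter_nil ps k hk, List.nil_append,
          show List.filter (fun p => p.1 == (k, t).1) [(k, t)] = [(k, t)] from by simp]
        rfl

-- inner email loop = fold of pvStep over the filtered pair segment
theorem pv_flatten_inner (tid : Int) (emails : List String) :
    ∀ d : PySem.Dict String (List Int),
      emails.foldl (pvAStep tid) d
        = (emails.filterMap (fun e => if e = "" then none else some (PySem.Str.lower e, tid))).foldl pvStep d := by
  induction emails with
  | nil => intro d; rfl
  | cons e es ih =>
    intro d
    by_cases he : e = "" <;> simp only [List.foldl_cons, List.filterMap_cons, he, if_pos,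
      ite_false, pvAStep_eq, List.foldl_cons] <;> exact ih _

-- A's nested loops are the fold of pvStep over the flattened pair stream
theorem pv_flatten (cluster : List (String × List Int)) (tickets_by_id : List (Int × List (String × List String))) :
    cluster_email_sources_py cluster tickets_by_id
      = ((pvBPairs cluster tickets_by_id).foldl pvStep PySem.Dict.empty).items := by
  unfold cluster_email_sources_py pvBPairs
  congr 1
  generalize (((PySem.Dict.mk cluster).get? "ticket_ids").getD []) = tids
  generalize (PySem.Dict.empty : PySem.Dict String (List Int)) = d0
  induction tids generalizing d0 with
  | nil => rfl
  | cons tid ts ih =>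
    simp only [List.foldl_cons, List.flatMap_cons, List.foldl_append]
    rw [pv_flatten_inner]
    exact ih _

-- ===== VERDICT (by name: the statement is the Claim_ definition above) =====
theorem cluster_email_sources_py_spec : Claim_equal_cluster_email_sources_py := by
  intro cluster tickets_by_id _
  unfold Spec_cluster_email_sources_py
  rw [pv_flatten, pv_fold_items]
  rfl
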